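-- pv_equiv track=rewrite | github.com/RuBisCO28/coding | hackerrank/permutation_game.py | permutationGame
-- ===== SOURCE A (Python) =====
-- def permutationGame(arr):
--   isIncreasing = lambda arr: all([arr[i] < arr[i + 1] for i in range(len(arr) - 1)])
--   memo = {}
--
--   def findWinner(arr):
--     key = tuple(arr)
--     if key in memo: return memo[key]
--
--     # If arr is ascending, then this player wins (base case)
--     if isIncreasing(arr):
--       memo[key] = True; return True
--
--     # Calculate next turns: If next player has any available winning moves, this player lost
--     for idx in range(len(arr)):
--       if findWinner(arr[:idx] + arr[idx + 1:]): memo[key] = False; return False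
--
--     # Otherwise, this player wins because next player has no winning moves available
--     memo[key] = True; return True
--
--   return 'Bob' if findWinner(arr) else 'Alice'
-- ===== SOURCE B (Python) =====
-- def permutationGame(arr):
--     # Bottom-up tabulation over index bitmasks (children = clear one set bit).
--     n = len(arr)
--     win = [False] * (1 << n)
--     for mask in range(1 << n):
--         sub = [arr[i] for i in range(n) if (mask >> i) & 1]
--         if all(a < b for a, b in zip(sub, sub[1:])):
--             win[mask] = True
--         else:
--             win[mask] = not any(win[mask ^ (1 << i)] for i in range(n) if (mask >> i) & 1)
--     return 'Bob' if win[(1 << n) - 1] else 'Alice'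
-- ===== Notes on version B (the rewrite author's own statement) =====
-- stated objective: alternative
-- what changed: Replaced the top-down memoized recursion over sliced value-tuples by a bottom-up dynamic program over index bitmasks: a win table over all 2^n masks is filled in increasing mask order (children = one set bit cleared), and the answer is read off at the full mask.
import Mathlib
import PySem

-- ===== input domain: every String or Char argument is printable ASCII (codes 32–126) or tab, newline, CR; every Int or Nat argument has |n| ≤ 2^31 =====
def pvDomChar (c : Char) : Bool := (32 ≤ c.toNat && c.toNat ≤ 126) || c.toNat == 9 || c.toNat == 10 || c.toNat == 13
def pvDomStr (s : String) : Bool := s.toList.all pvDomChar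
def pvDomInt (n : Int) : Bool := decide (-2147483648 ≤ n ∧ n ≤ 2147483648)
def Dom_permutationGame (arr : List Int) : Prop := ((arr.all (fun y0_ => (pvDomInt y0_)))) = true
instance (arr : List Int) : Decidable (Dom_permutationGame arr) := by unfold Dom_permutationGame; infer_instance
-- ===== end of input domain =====

-- B replaces A's top-down memoized recursion over sliced value-tuples by a bottom-up
-- sweep over index bitmasks filling a win table; return value only, no side effects.

-- ===== PORT A =====

-- isIncreasing = lambda arr: all([arr[i] < arr[i + 1] for i in range(len(arr) - 1)])
-- (indices i, i+1 are always in range, so arr[i] is ported as pyGetD with an unused default)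
def isIncA (arr : List Int) : Bool :=
  ((PySem.List.pyRange 0 ((arr.length : Int) - 1) 1).map (fun i =>
    decide (PySem.List.pyGetD arr i 0 < PySem.List.pyGetD arr (i + 1) 0))).all (fun b => b)

-- arr[:idx] + arr[idx+1:]
def childA (arr : List Int) (idx : Nat) : List Int :=
  PySem.List.slice arr none (some (idx : Int)) ++ PySem.List.slice arr (some ((idx : Int) + 1)) none

theorem childA_length_lt (arr : List Int) (idx : Nat) (h : idx < arr.length) :
    (childA arr idx).length < arr.length := by
  have h1 : ((idx : Int) + 1) = ((idx + 1 : Nat) : Int) := by push_cast; ring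
  rw [childA, PySem.List.slice_to_natCast, h1, PySem.List.slice_from_natCast,
    List.length_append, List.length_take, List.length_drop]
  omega

-- def findWinner(arr): memoized recursion; the for-loop over idx is loopA
mutual
def findWinnerA (arr : List Int) (memo : PySem.Dict (List Int) Bool) :
    Bool × PySem.Dict (List Int) Bool :=
  match memo.get? arr with
  | some v => (v, memo)
  | none =>
    if isIncA arr then (true, memo.insert arr true)
    else loopA arr 0 memo
termination_by (arr.length, 1, 0)

def loopA (arr : List Int) (idx : Nat) (memo : PySem.Dict (List Int) Bool) :
    Bool × PySem.Dict (List Int) Bool :=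
  if _h : idx < arr.length then
    match findWinnerA (childA arr idx) memo with
    | (r, m) =>
      if r then (false, m.insert arr false)
      else loopA arr (idx + 1) m
  else (true, memo.insert arr true)
termination_by (arr.length, 0, arr.length - idx)
decreasing_by
  · exact Prod.Lex.left _ _ (childA_length_lt arr idx _h)
  · exact Prod.Lex.right _ (Prod.Lex.right _ (by omega))
end

def permutationGame (arr : List Int) : String :=
  if (findWinnerA arr PySem.Dict.empty).1 then "Bob" else "Alice"

-- ===== PORT B =====

def permutationGame_alt (arr : List Int) : String :=
  let n := arr.length
  let win := (List.range (1 <<< n)).foldl (fun (win : List Bool) (mask : Nat) =>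
      -- sub = [arr[i] for i in range(n) if (mask >> i) & 1]   (i < n, so arr[i] is getD with unused default)
      let sub := (List.range n).filterMap (fun i =>
        if (mask >>> i) &&& 1 == 1 then some (arr.getD i 0) else none)
      let v : Bool :=
        if (sub.zip sub.tail).all (fun p => decide (p.1 < p.2)) then true
        else !((List.range n).any (fun i =>
          if (mask >>> i) &&& 1 == 1 then win.getD (mask ^^^ (1 <<< i)) false else false))
      win.set mask v)
    (List.replicate (1 <<< n) false)
  if win.getD ((1 <<< n) - 1) false then "Bob" else "Alice"

-- ===== PRECONDITION & SPEC =====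
def Spec_permutationGame (arr : List Int) (out : String) : Prop := out = permutationGame_alt arr
instance (arr : List Int) (out : String) : Decidable (Spec_permutationGame arr out) := by unfold Spec_permutationGame; infer_instance

-- ===== CLAIM (what is proved, stated in full; the proofs are below) =====
def Claim_equal_permutationGame : Prop := ∀ (arr : List Int), Dom_permutationGame arr → Spec_permutationGame arr (permutationGame arr)

-- ===== LEMMAS AND PROOFS =====

-- the common game value W: a position wins iff it is increasing, or every one-deletion child loses
def childOf (l : List Int) (i : Nat) : List Int := l.take i ++ l.drop (i + 1)

theorem childOf_length (l : List Int) (i : Nat) (h : i < l.length) :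
    (childOf l i).length = l.length - 1 := by
  simp [childOf]; omega

def W (arr : List Int) : Bool :=
  if isIncA arr then true
  else !((List.range arr.length).attach.any (fun i => W (childOf arr i.1)))
termination_by arr.length
decreasing_by
  have hi : i.1 < arr.length := by have := i.2; simpa using this
  have := childOf_length arr i.1 hi
  omega

theorem W_eq (arr : List Int) :
    W arr = if isIncA arr then true
            else !((List.range arr.length).any (fun i => W (childOf arr i))) := by
  rw [W]
  split
  · rfl
  · simp [List.any_eq]

-- both increasing tests decide List.IsChain (· < ·)
theorem incA_iff (l : List Int) :
    isIncA l = true ↔ List.IsChain (· < ·) l := by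
  rw [isIncA, List.isChain_iff_getElem]
  simp only [List.all_eq_true, List.mem_map]
  constructor
  · intro h i hi
    have hmem : (i : Int) ∈ PySem.List.pyRange 0 ((l.length : Int) - 1) 1 := by
      rw [PySem.List.mem_pyRange_one]; omega
    have := h _ ⟨(i : Int), hmem, rfl⟩
    rw [decide_eq_true_iff] at this
    rw [PySem.List.pyGetD_of_nonneg _ _ (by omega), PySem.List.pyGetD_of_nonneg _ _ (by omega)] at this
    have e1 : ((i : Int)).toNat = i := by omega
    have e2 : ((i : Int) + 1).toNat = i + 1 := by omega
    rw [e1, e2] at this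
    rw [List.getD_eq_getElem l 0 (by omega), List.getD_eq_getElem l 0 (by omega)] at this
    exact this
  · intro h b hb
    obtain ⟨x, hx, rfl⟩ := hb
    rw [PySem.List.mem_pyRange_one] at hx
    rw [decide_eq_true_iff]
    rw [PySem.List.pyGetD_of_nonneg _ _ (by omega), PySem.List.pyGetD_of_nonneg _ _ (by omega)]
    have e2 : (x + 1).toNat = x.toNat + 1 := by omega
    rw [e2]
    rw [List.getD_eq_getElem l 0 (by omega), List.getD_eq_getElem l 0 (by omega)]
    exact h x.toNat (by omega)

theorem incB_iff (l : List Int) :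
    ((l.zip l.tail).all (fun p => decide (p.1 < p.2))) = true ↔ List.IsChain (· < ·) l := by
  induction l with
  | nil => simp
  | cons a as ih =>
    cases as with
    | nil => simp
    | cons b bs =>
      simp only [List.tail_cons, List.zip_cons_cons, List.all_cons, Bool.and_eq_true,
        decide_eq_true_iff, List.isChain_cons_cons]
      rw [← ih]
      tauto

theorem incB_eq_incA (l : List Int) :
    ((l.zip l.tail).all (fun p => decide (p.1 < p.2))) = isIncA l := by
  rw [Bool.eq_iff_iff]
  exact (incB_iff l).trans (incA_iff l).symm

-- childOf facts
theorem childOf_zero (a : Int) (l : List Int) : childOf (a :: l) 0 = l := by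
  simp [childOf]

theorem childOf_succ (a : Int) (l : List Int) (j : Nat) :
    childOf (a :: l) (j + 1) = a :: childOf l j := by
  simp [childOf]

theorem childA_eq_childOf (arr : List Int) (idx : Nat) : childA arr idx = childOf arr idx := by
  have h1 : ((idx : Int) + 1) = ((idx + 1 : Nat) : Int) := by push_cast; ring
  rw [childA, PySem.List.slice_to_natCast, h1, PySem.List.slice_from_natCast, childOf]

-- ===== B-side: bitmask combinatorics =====

-- the subsequence selected by a bitmask, consuming one bit per element
def subR : List Int → Nat → List Int
  | [], _ => []
  | a :: as, m => if m % 2 = 1 then a :: subR as (m / 2) else subR as (m / 2)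

theorem bitp_eq_testBit (m i : Nat) : ((m >>> i) &&& 1 == 1) = m.testBit i := by
  simp [Nat.testBit, Nat.and_one_is_mod, Nat.one_and_eq_mod_two]

theorem sub_eq (arr : List Int) : ∀ (mask : Nat),
    (List.range arr.length).filterMap (fun i =>
      if (mask >>> i) &&& 1 == 1 then some (arr.getD i 0) else none) = subR arr mask := by
  induction arr with
  | nil => intro mask; rfl
  | cons a as ih =>
    intro mask
    rw [List.length_cons, List.range_succ_eq_map]
    have htail : (List.range as.length).filterMap
        ((fun i => if (mask >>> i) &&& 1 == 1 then some ((a :: as).getD i 0) else none) ∘ Nat.succ)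
        = subR as (mask / 2) := by
      rw [← ih (mask / 2)]
      apply List.filterMap_congr
      intro i _
      simp [Function.comp, Nat.shiftRight_succ_inside]
    by_cases hm : mask % 2 = 1
    · rw [subR, if_pos hm]
      have hf0 : (if (mask >>> 0) &&& 1 == 1 then some ((a :: as).getD 0 0) else none) = some a := by
        simp [Nat.and_one_is_mod, hm]
      simp only [List.filterMap_cons, hf0]
      rw [List.filterMap_map, htail]
    · rw [subR, if_neg hm]
      have hf0 : (if (mask >>> 0) &&& 1 == 1 then some ((a :: as).getD 0 0) else none) = none := by
        simp [Nat.and_one_is_mod, hm]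
      simp only [List.filterMap_cons, hf0]
      rw [List.filterMap_map, htail]

theorem xor_shift_mod_two (m i : Nat) : (m ^^^ (1 <<< (i + 1))) % 2 = m % 2 := by
  rw [Nat.one_shiftLeft, Nat.xor_mod_two_eq]
  have : 2 ^ (i + 1) % 2 = 0 := by
    simp [Nat.pow_succ]
  omega

theorem xor_shift_div_two (m i : Nat) : (m ^^^ (1 <<< (i + 1))) / 2 = (m / 2) ^^^ (1 <<< i) := by
  apply Nat.eq_of_testBit_eq
  intro j
  simp [Nat.testBit_div_two, Nat.testBit_xor, Nat.one_shiftLeft, Nat.testBit_two_pow]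

theorem xor_clear_lt (m i : Nat) (h : ((m >>> i) &&& 1 == 1) = true) : m ^^^ (1 <<< i) < m := by
  rw [bitp_eq_testBit] at h
  apply Nat.lt_of_testBit i
  · simp [Nat.testBit_xor, Nat.one_shiftLeft, h]
  · exact h
  · intro j hj
    have hne : ¬ (i = j) := by omega
    simp [Nat.testBit_xor, Nat.one_shiftLeft, hne]

-- KEY: clearing the set bits of mask one at a time yields exactly the one-deletion
-- children of the selected subsequence, in order
theorem subR_xor_succ (a : Int) (as : List Int) (m i : Nat) :
    subR (a :: as) (m ^^^ (1 <<< (i + 1)))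
      = if m % 2 = 1 then a :: subR as ((m / 2) ^^^ (1 <<< i)) else subR as ((m / 2) ^^^ (1 <<< i)) := by
  rw [subR, xor_shift_mod_two, xor_shift_div_two]

theorem key_children (arr : List Int) : ∀ (mask : Nat),
    ((List.range arr.length).filter (fun i => (mask >>> i) &&& 1 == 1)).map
        (fun i => subR arr (mask ^^^ (1 <<< i)))
      = (List.range (subR arr mask).length).map (fun j => childOf (subR arr mask) j) := by
  induction arr with
  | nil => intro mask; rfl
  | cons a as ih =>
    intro mask
    rw [List.length_cons, List.range_succ_eq_map, List.filter_cons]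
    have hfilt : (List.map Nat.succ (List.range as.length)).filter
          (fun i => (mask >>> i) &&& 1 == 1)
        = List.map Nat.succ ((List.range as.length).filter
          (fun i => ((mask / 2) >>> i) &&& 1 == 1)) := by
      rw [List.filter_map]
      congr 1
      apply List.filter_congr
      intro i _
      simp [Function.comp, Nat.shiftRight_succ_inside]
    have htail : (List.map Nat.succ ((List.range as.length).filter
          (fun i => ((mask / 2) >>> i) &&& 1 == 1))).map
          (fun i => subR (a :: as) (mask ^^^ (1 <<< i)))
        = ((List.range as.length).filter (fun i => ((mask / 2) >>> i) &&& 1 == 1)).map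
          (fun i => subR (a :: as) (mask ^^^ (1 <<< (i + 1)))) := by
      rw [List.map_map]; rfl
    by_cases hm : mask % 2 = 1
    · have hbit0 : ((mask >>> 0) &&& 1 == 1) = true := by
        simp [Nat.and_one_is_mod, hm]
      rw [if_pos hbit0]
      have hsub : subR (a :: as) mask = a :: subR as (mask / 2) := by rw [subR, if_pos hm]
      rw [hsub]
      have hhead : subR (a :: as) (mask ^^^ (1 <<< 0)) = subR as (mask / 2) := by
        have hodd : Odd mask := Nat.odd_iff.mpr hm
        have h1 : mask ^^^ (1 <<< 0) = mask - 1 := by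
          simpa using Nat.xor_one_of_odd hodd
        rw [h1, subR]
        have h3 : (mask - 1) / 2 = mask / 2 := by omega
        rw [if_neg (by omega), h3]
      rw [List.map_cons, hhead, hfilt, htail]
      have hterm : ((List.range as.length).filter (fun i => ((mask / 2) >>> i) &&& 1 == 1)).map
            (fun i => subR (a :: as) (mask ^^^ (1 <<< (i + 1))))
          = ((List.range as.length).filter (fun i => ((mask / 2) >>> i) &&& 1 == 1)).map
            (fun i => a :: subR as ((mask / 2) ^^^ (1 <<< i))) := by
        apply List.map_congr_left
        intro i _
        rw [subR_xor_succ, if_pos hm]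
      rw [hterm]
      have hmapcons : ((List.range as.length).filter (fun i => ((mask / 2) >>> i) &&& 1 == 1)).map
            (fun i => a :: subR as ((mask / 2) ^^^ (1 <<< i)))
          = (((List.range as.length).filter (fun i => ((mask / 2) >>> i) &&& 1 == 1)).map
            (fun i => subR as ((mask / 2) ^^^ (1 <<< i)))).map (fun l => a :: l) := by
        rw [List.map_map]; rfl
      rw [hmapcons, ih (mask / 2)]
      rw [List.length_cons, List.range_succ_eq_map, List.map_cons, childOf_zero, List.map_map]
      congr 1
      rw [List.map_map]
      apply List.map_congr_left
      intro j _
      simp [Function.comp, childOf_succ]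
    · rw [if_neg (by simp [Nat.and_one_is_mod]; omega)]
      have hsub : subR (a :: as) mask = subR as (mask / 2) := by rw [subR, if_neg hm]
      rw [hsub, hfilt, htail]
      have hterm : ((List.range as.length).filter (fun i => ((mask / 2) >>> i) &&& 1 == 1)).map
            (fun i => subR (a :: as) (mask ^^^ (1 <<< (i + 1))))
          = ((List.range as.length).filter (fun i => ((mask / 2) >>> i) &&& 1 == 1)).map
            (fun i => subR as ((mask / 2) ^^^ (1 <<< i))) := by
        apply List.map_congr_left
        intro i _
        rw [subR_xor_succ, if_neg hm]
      rw [hterm, ih (mask / 2)]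

theorem subR_full (arr : List Int) : subR arr (2 ^ arr.length - 1) = arr := by
  induction arr with
  | nil => rfl
  | cons a as ih =>
    have h2 : 2 ^ (as.length + 1) = 2 * 2 ^ as.length := by ring
    have hpos : 0 < 2 ^ as.length := Nat.two_pow_pos as.length
    rw [subR]
    rw [List.length_cons, if_pos (by omega)]
    have : (2 ^ (as.length + 1) - 1) / 2 = 2 ^ as.length - 1 := by omega
    rw [this, ih]

-- helper: an any-with-guard over a range is an any over the filtered range
theorem any_if_filter (l : List Nat) (p : Nat → Bool) (f : Nat → Bool) :
    (l.any fun i => if p i then f i else false) = (l.filter p).any f := by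
  rw [List.any_filter]
  congr 1
  funext i
  cases hp : p i <;> simp

-- the fold body of B's table sweep, as a named function (let-free, definitionally the port's lambda)
def valB (arr : List Int) (win : List Bool) (mask : Nat) : Bool :=
  let sub := (List.range arr.length).filterMap (fun i =>
    if (mask >>> i) &&& 1 == 1 then some (arr.getD i 0) else none)
  if (sub.zip sub.tail).all (fun p => decide (p.1 < p.2)) then true
  else !((List.range arr.length).any (fun i =>
    if (mask >>> i) &&& 1 == 1 then win.getD (mask ^^^ (1 <<< i)) false else false))

def stepB (arr : List Int) (win : List Bool) (mask : Nat) : List Bool :=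
  win.set mask (valB arr win mask)

-- the stored value is W of the selected subsequence, given the table is right below mask
theorem valB_correct (arr : List Int) (res : List Bool) (M : Nat)
    (hval : ∀ k, k < M → res.getD k false = W (subR arr k)) :
    valB arr res M = W (subR arr M) := by
  rw [valB]
  rw [sub_eq arr M, incB_eq_incA, W_eq (subR arr M)]
  by_cases hinc : isIncA (subR arr M) = true
  · rw [if_pos hinc, if_pos hinc]
  · rw [if_neg hinc, if_neg hinc]
    congr 1
    rw [any_if_filter]
    have hpoint : ((List.range arr.length).filter (fun i => (M >>> i) &&& 1 == 1)).any
          (fun i => res.getD (M ^^^ (1 <<< i)) false)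
        = ((List.range arr.length).filter (fun i => (M >>> i) &&& 1 == 1)).any
          (fun i => W (subR arr (M ^^^ (1 <<< i)))) := by
      rw [Bool.eq_iff_iff]
      simp only [List.any_eq_true]
      constructor
      · rintro ⟨i, hi, hp⟩
        refine ⟨i, hi, ?_⟩
        rw [← hval _ (xor_clear_lt M i (List.mem_filter.mp hi).2)]
        exact hp
      · rintro ⟨i, hi, hp⟩
        refine ⟨i, hi, ?_⟩
        rw [hval _ (xor_clear_lt M i (List.mem_filter.mp hi).2)]
        exact hp
    have hcomp : (fun i => W (subR arr (M ^^^ (1 <<< i))))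
        = (W ∘ fun i => subR arr (M ^^^ (1 <<< i))) := rfl
    rw [hpoint, hcomp, ← List.any_map, key_children arr M, List.any_map]
    rfl

-- the B fold invariant: after processing masks < M, the table holds W of each selected subsequence
theorem foldB (arr : List Int) : ∀ (M : Nat), M ≤ 2 ^ arr.length →
    ((List.range M).foldl (stepB arr) (List.replicate (2 ^ arr.length) false)).length
        = 2 ^ arr.length
    ∧ ∀ k, k < 2 ^ arr.length →
      ((List.range M).foldl (stepB arr) (List.replicate (2 ^ arr.length) false)).getD k false
        = if k < M then W (subR arr k) else false := by
  intro M
  induction M with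
  | zero =>
    intro _
    refine ⟨by simp, fun k hk => ?_⟩
    rw [List.range_zero, List.foldl_nil, List.getD_replicate _ hk]
    simp
  | succ M ih =>
    intro hM1
    have hM : M < 2 ^ arr.length := by omega
    obtain ⟨ihlen, ihval⟩ := ih (by omega)
    rw [List.range_succ, List.foldl_append, List.foldl_cons, List.foldl_nil]
    set res := (List.range M).foldl (stepB arr) (List.replicate (2 ^ arr.length) false) with hres
    have hval' : ∀ k, k < M → res.getD k false = W (subR arr k) := by
      intro k hk
      rw [ihval k (by omega), if_pos hk]
    constructor
    · rw [stepB, List.length_set, ihlen]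
    · intro k hk
      rw [stepB, List.getD_eq_getElem?_getD, List.getElem?_set]
      by_cases hkM : M = k
      · subst hkM
        rw [if_pos rfl, if_pos (by omega), if_pos (by omega)]
        simp only [Option.getD_some]
        exact valB_correct arr res M hval'
      · rw [if_neg hkM, ← List.getD_eq_getElem?_getD, ihval k hk]
        by_cases hkm : k < M
        · rw [if_pos hkm, if_pos (by omega)]
        · rw [if_neg hkm, if_neg (by omega)]

theorem alt_eq_W (arr : List Int) :
    permutationGame_alt arr = if W arr then "Bob" else "Alice" := by
  rw [permutationGame_alt]
  have hstep : (fun (win : List Bool) (mask : Nat) =>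
      let sub := (List.range arr.length).filterMap (fun i =>
        if (mask >>> i) &&& 1 == 1 then some (arr.getD i 0) else none)
      let v : Bool :=
        if (sub.zip sub.tail).all (fun p => decide (p.1 < p.2)) then true
        else !((List.range arr.length).any (fun i =>
          if (mask >>> i) &&& 1 == 1 then win.getD (mask ^^^ (1 <<< i)) false else false))
      win.set mask v) = stepB arr := rfl
  simp only []
  rw [Nat.one_shiftLeft, hstep]
  have hpos : 0 < 2 ^ arr.length := Nat.two_pow_pos arr.length
  obtain ⟨_, hval⟩ := foldB arr (2 ^ arr.length) (le_refl _)
  have h1 := hval (2 ^ arr.length - 1) (by omega)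
  rw [if_pos (by omega), subR_full] at h1
  rw [h1]

-- ===== A-side: the memo invariant =====

def InvM (memo : PySem.Dict (List Int) Bool) : Prop :=
  ∀ k v, memo.get? k = some v → v = W k

theorem InvM_empty : InvM PySem.Dict.empty := by
  intro k v h
  rw [PySem.Dict.get?_empty] at h
  cases h

theorem InvM_insert (memo : PySem.Dict (List Int) Bool) (arr : List Int)
    (hinv : InvM memo) : InvM (memo.insert arr (W arr)) := by
  intro k v h
  rw [PySem.Dict.get?_insert] at h
  split at h
  · rename_i hk; cases h; rw [hk]
  · exact hinv k v h

theorem isIncA_nil : isIncA ([] : List Int) = true := by decide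

theorem findWinnerA_correct (n : Nat) : ∀ (arr : List Int) (memo : PySem.Dict (List Int) Bool),
    arr.length ≤ n → InvM memo →
    (findWinnerA arr memo).1 = W arr ∧ InvM (findWinnerA arr memo).2 := by
  induction n with
  | zero =>
    intro arr memo hlen hinv
    have harr : arr = [] := by
      cases arr with
      | nil => rfl
      | cons a as => simp at hlen
    subst harr
    rw [findWinnerA]
    cases hget : memo.get? ([] : List Int) with
    | some v =>
      exact ⟨hinv _ _ hget, hinv⟩
    | none =>
      change (if isIncA ([] : List Int) = true
          then (true, memo.insert [] true) else loopA [] 0 memo).1 = W [] ∧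
        InvM (if isIncA ([] : List Int) = true
          then (true, memo.insert [] true) else loopA [] 0 memo).2
      rw [if_pos isIncA_nil]
      have hW : W ([] : List Int) = true := by rw [W_eq, if_pos isIncA_nil]
      refine ⟨hW.symm, ?_⟩
      rw [show (true : Bool) = W ([] : List Int) from hW.symm]
      exact InvM_insert _ _ hinv
  | succ n ihn =>
    intro arr memo hlen hinv
    rw [findWinnerA]
    cases hget : memo.get? arr with
    | some v =>
      exact ⟨hinv _ _ hget, hinv⟩
    | none =>
      change (if isIncA arr = true
          then (true, memo.insert arr true) else loopA arr 0 memo).1 = W arr ∧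
        InvM (if isIncA arr = true
          then (true, memo.insert arr true) else loopA arr 0 memo).2
      by_cases hinc : isIncA arr = true
      · rw [if_pos hinc]
        have hW : W arr = true := by rw [W_eq, if_pos hinc]
        refine ⟨hW.symm, ?_⟩
        rw [show (true : Bool) = W arr from hW.symm]
        exact InvM_insert _ _ hinv
      · rw [if_neg hinc]
        have hloop : ∀ (k idx : Nat) (memo' : PySem.Dict (List Int) Bool),
            arr.length - idx = k → InvM memo' →
            (∀ j, j < idx → W (childOf arr j) = false) →
            (loopA arr idx memo').1 = W arr ∧ InvM (loopA arr idx memo').2 := by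
          intro k
          induction k with
          | zero =>
            intro idx memo' hk hinv' hprev
            rw [loopA, dif_neg (by omega)]
            have hW : W arr = true := by
              rw [W_eq, if_neg hinc]
              have hany : (List.range arr.length).any (fun i => W (childOf arr i)) = false := by
                rw [List.any_eq_false]
                intro x hx
                rw [hprev x (by have := List.mem_range.mp hx; omega)]
                simp
              rw [hany]
              rfl
            refine ⟨hW.symm, ?_⟩
            rw [show (true : Bool) = W arr from hW.symm]
            exact InvM_insert _ _ hinv'
          | succ k ihk =>
            intro idx memo' hk hinv' hprev
            have hidx : idx < arr.length := by omega
            rw [loopA, dif_pos hidx]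
            obtain ⟨hr, hinv2⟩ := ihn (childA arr idx) memo'
              (by have := childA_length_lt arr idx hidx; omega) hinv'
            cases hfw : findWinnerA (childA arr idx) memo' with
            | mk r m =>
              rw [hfw] at hr hinv2
              change (if r = true then (false, m.insert arr false) else loopA arr (idx + 1) m).1
                  = W arr ∧
                InvM (if r = true
                  then (false, m.insert arr false) else loopA arr (idx + 1) m).2
              cases r with
              | true =>
                rw [if_pos rfl]
                have hchild : W (childOf arr idx) = true := by
                  rw [← childA_eq_childOf, ← hr]
                have hW : W arr = false := by
                  rw [W_eq, if_neg hinc]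
                  have hany : (List.range arr.length).any (fun i => W (childOf arr i)) = true := by
                    rw [List.any_eq_true]
                    exact ⟨idx, List.mem_range.mpr hidx, hchild⟩
                  rw [hany]
                  rfl
                refine ⟨hW.symm, ?_⟩
                rw [show (false : Bool) = W arr from hW.symm]
                exact InvM_insert _ _ hinv2
              | false =>
                rw [if_neg (by simp)]
                apply ihk (idx + 1) m (by omega) hinv2
                intro j hj
                by_cases hji : j < idx
                · exact hprev j hji
                · have hje : j = idx := by omega
                  subst hje
                  rw [← childA_eq_childOf, ← hr]
        exact hloop arr.length 0 memo (by omega) hinv (by intro j hj; omega)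

theorem a_eq_W (arr : List Int) :
    permutationGame arr = if W arr then "Bob" else "Alice" := by
  have h := findWinnerA_correct arr.length arr PySem.Dict.empty (le_refl _) InvM_empty
  rw [permutationGame, h.1]

-- ===== VERDICT (by name: the statement is the Claim_ definition above) =====
theorem permutationGame_spec : Claim_equal_permutationGame := by
  intro arr _
  unfold Spec_permutationGame
  rw [a_eq_W, alt_eq_W]
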